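-- pv_equiv track=rewrite | github.com/Eyal-Bahar/EasyRider_Bus_company_Project | Eas_Rider_Bus_Company/project/Easy Rider Bus Company/task/easyrider/easyrider.py | find_transfer_stops
-- ===== SOURCE A (Python) =====
-- import itertools
--
-- def find_transfer_stops(all_stops):
--     transfer_set = set()
--     for bus_a, bus_b in itertools.combinations(all_stops.keys(), 2):
--         a_set = set(all_stops[bus_a])
--         b_set = set(all_stops[bus_b])
--         a_b_shared_stops = list(a_set.intersection(b_set))
--         transfer_set.update(a_b_shared_stops)
--     return transfer_set
-- ===== SOURCE B (Python) =====
-- def find_transfer_stops(all_stops):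
--     seen_once = set()
--     transfer_set = set()
--     for stops in all_stops.values():
--         for stop in set(stops):
--             if stop in seen_once:
--                 transfer_set.add(stop)
--             else:
--                 seen_once.add(stop)
--     return transfer_set
-- ===== Notes on version B (the rewrite author's own statement) =====
-- stated objective: faster
-- what changed: One linear pass over the buses with two accumulator sets (seen-once / transfer) replaces the O(B^2) pairwise set intersections over all key pairs; Pre_ only excludes association lists with duplicate bus ids, which are not representable as the Python dict argument at all.
import Mathlib
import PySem

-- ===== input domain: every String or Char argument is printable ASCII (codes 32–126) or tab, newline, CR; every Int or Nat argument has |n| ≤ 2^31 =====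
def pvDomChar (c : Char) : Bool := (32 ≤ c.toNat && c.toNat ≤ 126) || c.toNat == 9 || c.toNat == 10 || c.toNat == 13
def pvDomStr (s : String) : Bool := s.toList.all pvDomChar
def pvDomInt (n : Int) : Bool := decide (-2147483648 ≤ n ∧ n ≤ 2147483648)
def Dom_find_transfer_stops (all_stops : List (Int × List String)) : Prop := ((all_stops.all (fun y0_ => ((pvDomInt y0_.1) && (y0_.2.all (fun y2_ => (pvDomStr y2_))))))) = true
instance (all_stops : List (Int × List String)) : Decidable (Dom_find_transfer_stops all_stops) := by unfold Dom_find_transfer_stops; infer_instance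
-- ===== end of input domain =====

-- B replaces the O(B^2) pairwise set intersections by one linear pass with two accumulator
-- sets (seen-once / transfer).  Both Pythons RETURN a set, whose iteration order Python
-- leaves unspecified (and PySem does not model): each port therefore renders the returned
-- set value in its canonical sorted order — the set VALUE is exact in both.

-- ===== PORT A =====
-- itertools.combinations(keys, 2): all pairs (keys[i], keys[j]) with i < j, in order.
def pyComb2 {α : Type} : List α → List (α × α)
  | [] => []
  | x :: xs => xs.map (fun y => (x, y)) ++ pyComb2 xs

-- Port of A.  all_stops[bus] is ported as getD with default [] (the key comes from
-- all_stops.keys(), so KeyError is impossible); list(a_set.intersection(b_set)) has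
-- unspecified hash order and is ported as Set.inter (a_set's order) — only its set value
-- matters, it is consumed by transfer_set.update.  The returned set is rendered sorted
-- (see header).
def find_transfer_stops (all_stops : List (Int × List String)) : List String :=
  let d := PySem.Dict.mk all_stops
  let transfer_set : PySem.Set String :=
    (pyComb2 (PySem.Dict.keys d)).foldl
      (fun t p =>
        PySem.Set.update t
          (PySem.Set.inter (PySem.Set.ofList (PySem.Dict.getD d p.1 []))
            (PySem.Set.ofList (PySem.Dict.getD d p.2 []))))
      PySem.Set.empty
  PySem.List.sorted transfer_set (fun x => x) false

-- ===== PORT B =====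
-- Port of B: one pass over all_stops.values(); per bus, iterate its distinct stops
-- (set(stops), order-insensitive here) updating the pair (seen_once, transfer_set).
-- The returned set is rendered sorted (see header).
def find_transfer_stops_alt (all_stops : List (Int × List String)) : List String :=
  let d := PySem.Dict.mk all_stops
  let st : PySem.Set String × PySem.Set String :=
    (PySem.Dict.values d).foldl
      (fun st stops =>
        (PySem.Set.ofList stops).foldl
          (fun st2 stop =>
            if PySem.Set.contains st2.1 stop then (st2.1, PySem.Set.add st2.2 stop)
            else (PySem.Set.add st2.1 stop, st2.2))
          st)
      (PySem.Set.empty, PySem.Set.empty)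
  PySem.List.sorted st.2 (fun x => x) false

-- ===== PRECONDITION & SPEC =====
-- Pre_ only excludes association lists with duplicate bus ids: the Python argument is a
-- dict, whose keys are necessarily distinct, so no input A accepts is excluded.
def Pre_find_transfer_stops (all_stops : List (Int × List String)) : Prop :=
  (all_stops.map Prod.fst).Nodup
instance (all_stops : List (Int × List String)) : Decidable (Pre_find_transfer_stops all_stops) := by unfold Pre_find_transfer_stops; infer_instance

def pvWitness_find_transfer_stops : (List (Int × List String)) :=
  [(1, ["a", "b"]), (2, ["b", "c"]), (3, ["c"])]

def Spec_find_transfer_stops (all_stops : List (Int × List String)) (out : List String) : Prop := out = find_transfer_stops_alt all_stops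
instance (all_stops : List (Int × List String)) (out : List String) : Decidable (Spec_find_transfer_stops all_stops out) := by unfold Spec_find_transfer_stops; infer_instance

-- ===== CLAIM (what is proved, stated in full; the proofs are below) =====
def Claim_equal_find_transfer_stops : Prop := ∀ (all_stops : List (Int × List String)), Dom_find_transfer_stops all_stops → Pre_find_transfer_stops all_stops → Spec_find_transfer_stops all_stops (find_transfer_stops all_stops)

-- ===== LEMMAS AND PROOFS =====

-- x occurs in (at least) two distinct buses of L
def sharedTwice (x : String) : List (List String) → Prop
  | [] => False
  | b :: L => (x ∈ b ∧ ∃ c ∈ L, x ∈ c) ∨ sharedTwice x L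

theorem pyComb2_map {α β : Type} (f : α → β) (l : List α) :
    pyComb2 (l.map f) = (pyComb2 l).map (fun p => (f p.1, f p.2)) := by
  induction l with
  | nil => rfl
  | cons x xs ih => simp [pyComb2, ih, List.map_map, Function.comp]

theorem pyComb2_mem {α : Type} {l : List α} {p : α × α} (h : p ∈ pyComb2 l) :
    p.1 ∈ l ∧ p.2 ∈ l := by
  induction l with
  | nil => simp [pyComb2] at h
  | cons x xs ih =>
    simp only [pyComb2, List.mem_append, List.mem_map] at h
    rcases h with ⟨y, hy, rfl⟩ | h
    · exact ⟨List.mem_cons_self, List.mem_cons_of_mem _ hy⟩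
    · exact ⟨List.mem_cons_of_mem _ (ih h).1, List.mem_cons_of_mem _ (ih h).2⟩

theorem mem_foldl_update {β : Type} (f : β → List String) (ps : List β)
    (t : PySem.Set String) (x : String) :
    x ∈ ps.foldl (fun t p => PySem.Set.update t (f p)) t ↔
      x ∈ t ∨ ∃ p ∈ ps, x ∈ f p := by
  induction ps generalizing t with
  | nil => simp
  | cons p ps ih => simp [ih, PySem.Set.mem_update]; tauto

theorem nodup_foldl_update {β : Type} (f : β → List String) (ps : List β)
    (t : PySem.Set String) (h : t.Nodup) :
    (ps.foldl (fun t p => PySem.Set.update t (f p)) t).Nodup := by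
  induction ps generalizing t with
  | nil => exact h
  | cons p ps ih => exact ih _ (PySem.Set.nodup_update _ _ h)

theorem exists_pyComb2_iff (x : String) (l : List (Int × List String)) :
    (∃ p ∈ pyComb2 l, x ∈ p.1.2 ∧ x ∈ p.2.2) ↔ sharedTwice x (l.map Prod.snd) := by
  induction l with
  | nil => simp [pyComb2, sharedTwice]
  | cons e l ih =>
    simp only [pyComb2, List.mem_append, List.mem_map, List.map_cons, sharedTwice, ← ih]
    constructor
    · rintro ⟨p, (⟨y, hy, rfl⟩ | hp), hx⟩
      · exact Or.inl ⟨hx.1, ⟨y.2, ⟨y, hy, rfl⟩, hx.2⟩⟩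
      · exact Or.inr ⟨p, hp, hx⟩
    · rintro (⟨hxe, c, ⟨y, hy, rfl⟩, hxc⟩ | ⟨p, hp, hx⟩)
      · exact ⟨(e, y), Or.inl ⟨y, hy, rfl⟩, hxe, hxc⟩
      · exact ⟨p, Or.inr hp, hx⟩

-- the inner loop of B, over the distinct stops of one bus
def innerStep (st2 : PySem.Set String × PySem.Set String) (stop : String) :
    PySem.Set String × PySem.Set String :=
  if PySem.Set.contains st2.1 stop then (st2.1, PySem.Set.add st2.2 stop)
  else (PySem.Set.add st2.1 stop, st2.2)

theorem innerStep_pos {s r : PySem.Set String} {y : String} (hy : y ∈ s) :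
    innerStep (s, r) y = (s, PySem.Set.add r y) := by
  simp only [innerStep]
  rw [if_pos ((PySem.Set.contains_iff s y).mpr hy)]

theorem innerStep_neg {s r : PySem.Set String} {y : String} (hy : y ∉ s) :
    innerStep (s, r) y = (PySem.Set.add s y, r) := by
  simp only [innerStep]
  rw [if_neg (fun h => hy ((PySem.Set.contains_iff s y).mp h))]

theorem inner_mem (ys : List String) (hys : ys.Nodup)
    (s r : PySem.Set String) (x : String) :
    (x ∈ (ys.foldl innerStep (s, r)).1 ↔ x ∈ s ∨ x ∈ ys) ∧
    (x ∈ (ys.foldl innerStep (s, r)).2 ↔ x ∈ r ∨ (x ∈ ys ∧ x ∈ s)) := by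
  induction ys generalizing s r with
  | nil => simp
  | cons y ys ih =>
    rcases List.nodup_cons.mp hys with ⟨hyn, hys'⟩
    simp only [List.foldl_cons]
    by_cases hy : y ∈ s
    · rw [innerStep_pos hy]
      rcases ih hys' s (PySem.Set.add r y) with ⟨h1, h2⟩
      have e1 : x = y → x ∈ s := fun e => e ▸ hy
      constructor
      · rw [h1]
        simp only [List.mem_cons]
        constructor
        · rintro (h | h)
          · exact Or.inl h
          · exact Or.inr (Or.inr h)
        · rintro (h | h | h)
          · exact Or.inl h
          · exact Or.inl (e1 h)
          · exact Or.inr h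
      · rw [h2, PySem.Set.mem_add]
        simp only [List.mem_cons]
        constructor
        · rintro ((h | h) | ⟨hm, hs⟩)
          · exact Or.inl h
          · exact Or.inr ⟨Or.inl h, e1 h⟩
          · exact Or.inr ⟨Or.inr hm, hs⟩
        · rintro (h | ⟨(h | h), hs⟩)
          · exact Or.inl (Or.inl h)
          · exact Or.inl (Or.inr h)
          · exact Or.inr ⟨h, hs⟩
    · rw [innerStep_neg hy]
      rcases ih hys' (PySem.Set.add s y) r with ⟨h1, h2⟩
      have e1 : x = y → x ∉ ys := fun e => e ▸ hyn
      have e2 : x = y → x ∉ s := fun e => e ▸ hy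
      constructor
      · rw [h1, PySem.Set.mem_add]
        simp only [List.mem_cons]
        exact or_assoc
      · rw [h2]
        simp only [PySem.Set.mem_add, List.mem_cons]
        constructor
        · rintro (h | ⟨hm, hs | he⟩)
          · exact Or.inl h
          · exact Or.inr ⟨Or.inr hm, hs⟩
          · exact (e1 he hm).elim
        · rintro (h | ⟨(he | hm), hs⟩)
          · exact Or.inl h
          · exact (e2 he hs).elim
          · exact Or.inr ⟨hm, Or.inl hs⟩

theorem inner_nodup (ys : List String) (s r : PySem.Set String)
    (h1 : s.Nodup) (h2 : r.Nodup) :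
    (ys.foldl innerStep (s, r)).1.Nodup ∧ (ys.foldl innerStep (s, r)).2.Nodup := by
  induction ys generalizing s r with
  | nil => exact ⟨h1, h2⟩
  | cons y ys ih =>
    simp only [List.foldl_cons]
    by_cases hy : y ∈ s
    · rw [innerStep_pos hy]
      exact ih _ _ h1 (PySem.Set.nodup_add _ _ h2)
    · rw [innerStep_neg hy]
      exact ih _ _ (PySem.Set.nodup_add _ _ h1) h2

theorem outer_mem (L : List (List String)) (s r : PySem.Set String) (x : String) :
    (x ∈ (L.foldl (fun st stops => (PySem.Set.ofList stops).foldl innerStep st) (s, r)).2 ↔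
      x ∈ r ∨ (∃ b ∈ L, x ∈ b ∧ x ∈ s) ∨ sharedTwice x L) ∧
    (x ∈ (L.foldl (fun st stops => (PySem.Set.ofList stops).foldl innerStep st) (s, r)).1 ↔
      x ∈ s ∨ ∃ b ∈ L, x ∈ b) := by
  induction L generalizing s r with
  | nil => simp [sharedTwice]
  | cons b L ih =>
    simp only [List.foldl_cons]
    have hpair : (PySem.Set.ofList b).foldl innerStep (s, r) =
        (((PySem.Set.ofList b).foldl innerStep (s, r)).1,
         ((PySem.Set.ofList b).foldl innerStep (s, r)).2) := rfl
    rcases inner_mem (PySem.Set.ofList b) (PySem.Set.nodup_ofList b) s r x with ⟨hs1, hr1⟩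
    rw [hpair]
    rcases ih (((PySem.Set.ofList b).foldl innerStep (s, r)).1)
      (((PySem.Set.ofList b).foldl innerStep (s, r)).2) with ⟨ih2, ih1⟩
    rw [PySem.Set.mem_ofList] at hs1 hr1
    constructor
    · rw [ih2]
      simp only [hr1, hs1, sharedTwice, List.mem_cons]
      constructor
      · rintro ((h | ⟨hb, hs⟩) | ⟨c, hc, hxc, hs | hb⟩ | h)
        · exact Or.inl h
        · exact Or.inr (Or.inl ⟨b, Or.inl rfl, hb, hs⟩)
        · exact Or.inr (Or.inl ⟨c, Or.inr hc, hxc, hs⟩)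
        · exact Or.inr (Or.inr (Or.inl ⟨hb, c, hc, hxc⟩))
        · exact Or.inr (Or.inr (Or.inr h))
      · rintro (h | ⟨c, (rfl | hc), hxc, hs⟩ | ⟨hb, c, hc, hxc⟩ | h)
        · exact Or.inl (Or.inl h)
        · exact Or.inl (Or.inr ⟨hxc, hs⟩)
        · exact Or.inr (Or.inl ⟨c, hc, hxc, Or.inl hs⟩)
        · exact Or.inr (Or.inl ⟨c, hc, hxc, Or.inr hb⟩)
        · exact Or.inr (Or.inr h)
    · rw [ih1]
      simp only [hs1, List.mem_cons]
      constructor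
      · rintro ((h | h) | ⟨c, hc, hxc⟩)
        · exact Or.inl h
        · exact Or.inr ⟨b, Or.inl rfl, h⟩
        · exact Or.inr ⟨c, Or.inr hc, hxc⟩
      · rintro (h | ⟨c, (rfl | hc), hxc⟩)
        · exact Or.inl (Or.inl h)
        · exact Or.inl (Or.inr hxc)
        · exact Or.inr ⟨c, hc, hxc⟩

theorem outer_nodup (L : List (List String)) (s r : PySem.Set String)
    (h1 : s.Nodup) (h2 : r.Nodup) :
    (L.foldl (fun st stops => (PySem.Set.ofList stops).foldl innerStep st) (s, r)).2.Nodup := by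
  induction L generalizing s r with
  | nil => exact h2
  | cons b L ih =>
    simp only [List.foldl_cons]
    have hpair : (PySem.Set.ofList b).foldl innerStep (s, r) =
        (((PySem.Set.ofList b).foldl innerStep (s, r)).1,
         ((PySem.Set.ofList b).foldl innerStep (s, r)).2) := rfl
    rw [hpair]
    rcases inner_nodup (PySem.Set.ofList b) s r h1 h2 with ⟨n1, n2⟩
    exact ih _ _ n1 n2

theorem memA (all_stops : List (Int × List String))
    (hpre : (all_stops.map Prod.fst).Nodup) (x : String) :
    (x ∈ (pyComb2 ((PySem.Dict.mk all_stops).keys)).foldl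
      (fun t p =>
        PySem.Set.update t
          (PySem.Set.inter
            (PySem.Set.ofList (PySem.Dict.getD (PySem.Dict.mk all_stops) p.1 []))
            (PySem.Set.ofList (PySem.Dict.getD (PySem.Dict.mk all_stops) p.2 []))))
      PySem.Set.empty) ↔ sharedTwice x (all_stops.map Prod.snd) := by
  have hkeys : (PySem.Dict.mk all_stops).keys = all_stops.map Prod.fst := by
    simp [PySem.Dict.keys_mk]
  have hget : ∀ e ∈ all_stops, PySem.Dict.getD (PySem.Dict.mk all_stops) e.1 [] = e.2 := by
    intro e he
    have hitems : (e.1, e.2) ∈ (PySem.Dict.mk all_stops).items := by simpa using he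
    exact PySem.Dict.getD_of_mem_items _ hitems (by simpa [hkeys] using hpre) []
  rw [hkeys, pyComb2_map, List.foldl_map,
    mem_foldl_update (fun p : (Int × List String) × (Int × List String) =>
      PySem.Set.inter
        (PySem.Set.ofList (PySem.Dict.getD (PySem.Dict.mk all_stops) p.1.1 []))
        (PySem.Set.ofList (PySem.Dict.getD (PySem.Dict.mk all_stops) p.2.1 [])))]
  rw [← exists_pyComb2_iff]
  simp only [PySem.Set.mem_inter, PySem.Set.mem_ofList]
  constructor
  · rintro (h | ⟨p, hp, h1, h2⟩)
    · exact absurd h (List.not_mem_nil)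
    · rcases pyComb2_mem hp with ⟨m1, m2⟩
      exact ⟨p, hp, by rwa [hget _ m1] at h1, by rwa [hget _ m2] at h2⟩
  · rintro ⟨p, hp, h1, h2⟩
    rcases pyComb2_mem hp with ⟨m1, m2⟩
    exact Or.inr ⟨p, hp, by rwa [hget _ m1], by rwa [hget _ m2]⟩

-- ===== VERDICT (by name: the statement is the Claim_ definition above) =====
theorem find_transfer_stops_spec : Claim_equal_find_transfer_stops := by
  intro all_stops _ hpre
  show find_transfer_stops all_stops = find_transfer_stops_alt all_stops
  have hB : find_transfer_stops_alt all_stops = PySem.List.sorted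
      ((all_stops.map Prod.snd).foldl
        (fun st stops => (PySem.Set.ofList stops).foldl innerStep st)
        (PySem.Set.empty, PySem.Set.empty)).2 (fun x => x) false := rfl
  rw [hB]
  show PySem.List.sorted _ (fun x => x) false = _
  rw [PySem.List.sorted_id_eq_sorted_id_iff_perm]
  have hnA : ((pyComb2 ((PySem.Dict.mk all_stops).keys)).foldl
      (fun t p =>
        PySem.Set.update t
          (PySem.Set.inter
            (PySem.Set.ofList (PySem.Dict.getD (PySem.Dict.mk all_stops) p.1 []))
            (PySem.Set.ofList (PySem.Dict.getD (PySem.Dict.mk all_stops) p.2 []))))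
      PySem.Set.empty).Nodup :=
    nodup_foldl_update _ _ _ List.nodup_nil
  have hnB : (((all_stops.map Prod.snd).foldl
      (fun st stops => (PySem.Set.ofList stops).foldl innerStep st)
      (PySem.Set.empty, PySem.Set.empty)).2).Nodup :=
    outer_nodup _ _ _ List.nodup_nil List.nodup_nil
  apply (List.perm_ext_iff_of_nodup hnA hnB).mpr
  intro a
  rw [memA all_stops hpre a]
  rcases outer_mem (all_stops.map Prod.snd) PySem.Set.empty PySem.Set.empty a with ⟨h2, _⟩
  rw [h2]
  simp [PySem.Set.empty]
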